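-- pv_equiv track=rewrite | github.com/HuyGiaMsk/Duty | src/Duty.py | produce_needed_to_add_cookie_contents
-- ===== SOURCE A (Python) =====
-- def produce_needed_to_add_cookie_contents(batch_size: int = 20, fcr_numbers: list[str] = None) -> tuple[
--     list[str], list[str]]:
--     download_filter_cookies = []
--     search_filter_cookies = []
--
--     initial_download_filter_value = 'SavedString= and ('
--     current_download_filter_cookie = initial_download_filter_value
--
--     initial_search_filter_value = ''
--     current_search_filter_cookie = initial_search_filter_value
--
--     current_index = 0
--     for fcr in fcr_numbers:
--         current_search_filter_cookie += 'Download_Search_1_{}=SourceName&Download_Search_2_{}==&Download_Search_3_{}={}&'.format(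
--             current_index, current_index, current_index, fcr)
--         current_download_filter_cookie += f'SourceName=\'{fcr}\' or '
--         current_index += 1
--
--         if current_index >= batch_size:
--             current_download_filter_cookie = current_download_filter_cookie[:-4]
--             download_filter_cookies.append(f'{current_download_filter_cookie})')
--             current_download_filter_cookie = initial_download_filter_value
--
--             current_search_filter_cookie = current_search_filter_cookie[:-1]
--             search_filter_cookies.append(f'{current_search_filter_cookie})')
--             current_search_filter_cookie = initial_search_filter_value
--
--             current_index = 0
--
--     if len(current_download_filter_cookie) > 0:
--         current_download_filter_cookie = current_download_filter_cookie[:-4]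
--         download_filter_cookies.append(f'{current_download_filter_cookie})')
--
--         current_search_filter_cookie = current_search_filter_cookie[:-1]
--         search_filter_cookies.append(f'{current_search_filter_cookie})')
--
--     return download_filter_cookies, search_filter_cookies
-- ===== SOURCE B (Python) =====
-- def produce_needed_to_add_cookie_contents(batch_size: int = 20, fcr_numbers: list[str] = None) -> tuple[
--         list[str], list[str]]:
--     download_filter_cookies = []
--     search_filter_cookies = []
--     for start in range(0, len(fcr_numbers), batch_size):
--         chunk = fcr_numbers[start:start + batch_size]
--         download_filter_cookies.append(
--             'SavedString= and (' + ' or '.join("SourceName='{}'".format(f) for f in chunk) + ')')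
--         search_filter_cookies.append(
--             '&'.join('Download_Search_1_{0}=SourceName&Download_Search_2_{0}==&Download_Search_3_{0}={1}'.format(j, f)
--                      for j, f in enumerate(chunk)) + ')')
--     return download_filter_cookies, search_filter_cookies
-- ===== Notes on version B (the rewrite author's own statement) =====
-- stated objective: simpler
-- what changed: Replaces A's streaming index-and-flush loop with a chunked range loop that slices each batch and renders it with separator joins; Pre_ restricts to the natural domain batch_size >= 1 (for batch_size <= 0 A degenerately flushes after every single item, outside the task's intent).
-- intended difference: When len(fcr_numbers) is a multiple of batch_size (including the empty list), A appends a leftover garbage pair ('SavedString= a)' and ')') from its unconditional final flush; B emits only the real batches, which is clearly the intended output. — e.g. on produce_needed_to_add_cookie_contents(1, []): A returns (["SavedString= a)"], [")"]), B returns ([], [])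
-- outside the precondition, e.g. on produce_needed_to_add_cookie_contents(0, []): A returns (['SavedString= a)'], [')']), B raises ValueError; on produce_needed_to_add_cookie_contents(-3, []): A returns (['SavedString= a)'], [')']), B returns ([], [])
import Mathlib
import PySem

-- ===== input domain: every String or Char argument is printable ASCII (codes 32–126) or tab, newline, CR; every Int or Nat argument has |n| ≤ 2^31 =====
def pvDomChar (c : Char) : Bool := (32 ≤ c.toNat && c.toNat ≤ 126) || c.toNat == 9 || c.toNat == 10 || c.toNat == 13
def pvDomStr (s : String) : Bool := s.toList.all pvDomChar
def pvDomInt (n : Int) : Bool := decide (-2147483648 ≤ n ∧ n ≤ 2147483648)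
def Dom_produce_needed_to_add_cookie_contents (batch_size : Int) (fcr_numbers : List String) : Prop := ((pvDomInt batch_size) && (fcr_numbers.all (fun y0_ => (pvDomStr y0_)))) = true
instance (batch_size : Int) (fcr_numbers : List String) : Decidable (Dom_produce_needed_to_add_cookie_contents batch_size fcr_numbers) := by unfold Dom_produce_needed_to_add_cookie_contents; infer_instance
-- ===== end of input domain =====

set_option maxHeartbeats 1000000


-- B replaces A's streaming index-and-flush loop with a chunked range loop rendering
-- each batch by separator joins; objective: simpler, same cost.

-- ===== PORT A =====
def pvInit : String := "SavedString= and ("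

def pvDlFragA (fcr : String) : String := "SourceName='" ++ fcr ++ "' or "

def pvSeFragA (idx : Int) (fcr : String) : String :=
  "Download_Search_1_" ++ PySem.Int.toStr idx ++ "=SourceName&Download_Search_2_"
    ++ PySem.Int.toStr idx ++ "==&Download_Search_3_" ++ PySem.Int.toStr idx
    ++ "=" ++ fcr ++ "&"

-- the for-loop body (state: download list, search list, current download, current search, current_index)
def pvLoopA (batch_size : Int)
    (st : List String × List String × String × String × Int) (fcr : String) :
    List String × List String × String × String × Int :=
  let (dls, ses, cd, cs, idx) := st
  let cs := cs ++ pvSeFragA idx fcr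
  let cd := cd ++ pvDlFragA fcr
  let idx := idx + 1
  if idx ≥ batch_size then
    (dls ++ [PySem.Str.slice cd none (some (-4)) ++ ")"],
     ses ++ [PySem.Str.slice cs none (some (-1)) ++ ")"],
     pvInit, "", 0)
  else
    (dls, ses, cd, cs, idx)

-- the trailing `if len(current_download_filter_cookie) > 0:` block
def pvFinishA (st : List String × List String × String × String × Int) :
    List String × List String :=
  let (dls, ses, cd, cs, _) := st
  if PySem.Str.len cd > 0 then
    (dls ++ [PySem.Str.slice cd none (some (-4)) ++ ")"],
     ses ++ [PySem.Str.slice cs none (some (-1)) ++ ")"])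
  else
    (dls, ses)

def produce_needed_to_add_cookie_contents (batch_size : Int) (fcr_numbers : List String) :
    List String × List String :=
  pvFinishA (fcr_numbers.foldl (pvLoopA batch_size) ([], [], pvInit, "", 0))

-- ===== PORT B =====
def pvSrcB (fcr : String) : String := "SourceName='" ++ fcr ++ "'"

def pvSeFragB (idx : Int) (fcr : String) : String :=
  "Download_Search_1_" ++ PySem.Int.toStr idx ++ "=SourceName&Download_Search_2_"
    ++ PySem.Int.toStr idx ++ "==&Download_Search_3_" ++ PySem.Int.toStr idx
    ++ "=" ++ fcr

-- 'SavedString= and (' + ' or '.join(...) + ')'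
def pvDlB (chunk : List String) : String :=
  "SavedString= and (" ++ PySem.Str.join " or " (chunk.map pvSrcB) ++ ")"

-- '&'.join(... for j, f in enumerate(chunk)) + ')'
def pvSeB (chunk : List String) : String :=
  PySem.Str.join "&" ((PySem.List.enumerate chunk).map (fun p => pvSeFragB p.1 p.2)) ++ ")"

-- the body of `for start in range(0, len(fcr_numbers), batch_size)`
def pvStepB (batch_size : Int) (fcr_numbers : List String)
    (acc : List String × List String) (start : Int) : List String × List String :=
  let chunk := PySem.List.slice fcr_numbers (some start) (some (start + batch_size))
  (acc.1 ++ [pvDlB chunk], acc.2 ++ [pvSeB chunk])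

def produce_needed_to_add_cookie_contents_alt (batch_size : Int) (fcr_numbers : List String) :
    List String × List String :=
  (PySem.List.pyRange 0 (PySem.List.len fcr_numbers) batch_size).foldl
    (pvStepB batch_size fcr_numbers) ([], [])

-- ===== PRECONDITION & SPEC =====
-- Pre_ restricts to the task's natural domain batch_size ≥ 1: for batch_size ≤ 0 A
-- degenerately flushes after every single item (and B's range() raises for 0 / is empty
-- for negatives), outside the task's intent.
def Pre_produce_needed_to_add_cookie_contents (batch_size : Int) (fcr_numbers : List String) : Prop :=
  1 ≤ batch_size
instance (batch_size : Int) (fcr_numbers : List String) : Decidable (Pre_produce_needed_to_add_cookie_contents batch_size fcr_numbers) := by unfold Pre_produce_needed_to_add_cookie_contents; infer_instance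

def pvWitness_produce_needed_to_add_cookie_contents : Int × List String := (2, ["a", "b", "c"])

-- When len(fcr_numbers) is a multiple of batch_size (including the empty list), A appends a
-- leftover garbage pair ('SavedString= a)' and ')') from its unconditional final flush;
-- B emits only the real batches, which is clearly the intended output.
def D_produce_needed_to_add_cookie_contents (batch_size : Int) (fcr_numbers : List String) : Prop :=
  (fcr_numbers.length : Int) % batch_size = 0
instance (batch_size : Int) (fcr_numbers : List String) : Decidable (D_produce_needed_to_add_cookie_contents batch_size fcr_numbers) := by unfold D_produce_needed_to_add_cookie_contents; infer_instance

def Spec_produce_needed_to_add_cookie_contents (batch_size : Int) (fcr_numbers : List String) (out : List String × List String) : Prop := ¬ D_produce_needed_to_add_cookie_contents batch_size fcr_numbers → out = produce_needed_to_add_cookie_contents_alt batch_size fcr_numbers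
instance (batch_size : Int) (fcr_numbers : List String) (out : List String × List String) : Decidable (Spec_produce_needed_to_add_cookie_contents batch_size fcr_numbers out) := by unfold Spec_produce_needed_to_add_cookie_contents; infer_instance

def pvDiffWitness_produce_needed_to_add_cookie_contents : Int × List String := (1, [])

def pvDiffWitnessOut_produce_needed_to_add_cookie_contents : (List String × List String) × (List String × List String) :=
  ((["SavedString= a)"], [")"]), ([], []))

-- ===== CLAIM (what is proved, stated in full; the proofs are below) =====
def Claim_unchanged_produce_needed_to_add_cookie_contents : Prop := ∀ (batch_size : Int) (fcr_numbers : List String), Dom_produce_needed_to_add_cookie_contents batch_size fcr_numbers → Pre_produce_needed_to_add_cookie_contents batch_size fcr_numbers → Spec_produce_needed_to_add_cookie_contents batch_size fcr_numbers (produce_needed_to_add_cookie_contents batch_size fcr_numbers)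
def Claim_changed_produce_needed_to_add_cookie_contents : Prop := Dom_produce_needed_to_add_cookie_contents (pvDiffWitness_produce_needed_to_add_cookie_contents.1) (pvDiffWitness_produce_needed_to_add_cookie_contents.2) ∧ Pre_produce_needed_to_add_cookie_contents (pvDiffWitness_produce_needed_to_add_cookie_contents.1) (pvDiffWitness_produce_needed_to_add_cookie_contents.2) ∧ D_produce_needed_to_add_cookie_contents (pvDiffWitness_produce_needed_to_add_cookie_contents.1) (pvDiffWitness_produce_needed_to_add_cookie_contents.2) ∧ produce_needed_to_add_cookie_contents (pvDiffWitness_produce_needed_to_add_cookie_contents.1) (pvDiffWitness_produce_needed_to_add_cookie_contents.2) = pvDiffWitnessOut_produce_needed_to_add_cookie_contents.1 ∧ produce_needed_to_add_cookie_contents_alt (pvDiffWitness_produce_needed_to_add_cookie_contents.1) (pvDiffWitness_produce_needed_to_add_cookie_contents.2) = pvDiffWitnessOut_produce_needed_to_add_cookie_contents.2 ∧ pvDiffWitnessOut_produce_needed_to_add_cookie_contents.1 ≠ pvDiffWitnessOut_produce_needed_to_add_cookie_contents.2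
def Claim_exact_produce_needed_to_add_cookie_contents : Prop := ∀ (batch_size : Int) (fcr_numbers : List String), Dom_produce_needed_to_add_cookie_contents batch_size fcr_numbers → Pre_produce_needed_to_add_cookie_contents batch_size fcr_numbers → D_produce_needed_to_add_cookie_contents batch_size fcr_numbers → produce_needed_to_add_cookie_contents batch_size fcr_numbers ≠ produce_needed_to_add_cookie_contents_alt batch_size fcr_numbers

-- ===== LEMMAS AND PROOFS =====

-- A's batches: peel full chunks while possible, then an unconditional trailing chunk
def pvChunksA (S : Nat) (l : List String) : List (List String) :=
  if h : 0 < S ∧ S ≤ l.length then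
    l.take S :: pvChunksA S (l.drop S)
  else [l]
termination_by l.length
decreasing_by simp; omega

-- B's batches: the slices l[start:start+S] for the starts 0, S, 2S, … below l.length
def pvChunksB (S : Nat) (l : List String) : List (List String) :=
  if h : 0 < S ∧ l ≠ [] then
    l.take S :: pvChunksB S (l.drop S)
  else []
termination_by l.length
decreasing_by cases l with
  | nil => simp at h
  | cons x t => simp; omega

-- A's rendering of one chunk (concatenate fragments, truncate, close)
def pvScat : List String → String
  | [] => ""
  | s :: r => s ++ pvScat r

def pvMkDlA (c : List String) : String :=
  PySem.Str.slice (pvInit ++ PySem.Str.join "" (c.map pvDlFragA)) none (some (-4)) ++ ")"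

def pvMkSeA (c : List String) : String :=
  PySem.Str.slice
      (PySem.Str.join "" ((PySem.List.enumerate c).map (fun p => pvSeFragA p.1 p.2)))
      none (some (-1)) ++ ")"

theorem pvCharsJoin (ls : List (List Char)) : PySem.Chars.join [] ls = ls.flatten := by
  show List.intercalate [] ls = ls.flatten
  induction ls with
  | nil => simp [List.intercalate]
  | cons h t ih =>
    cases t with
    | nil => simp [List.intercalate]
    | cons b r =>
      simp only [List.intercalate, List.intersperse] at *
      simp_all [List.flatten]

theorem pvScat_toList (ls : List String) :
    (pvScat ls).toList = (ls.map String.toList).flatten := by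
  induction ls with
  | nil => simp [pvScat]
  | cons h t ih => simp [pvScat, ih]

theorem pvJoin_empty (ls : List String) : PySem.Str.join "" ls = pvScat ls := by
  apply String.toList_inj.mp
  rw [PySem.Str.toList_join, pvScat_toList]
  simpa using pvCharsJoin (ls.map String.toList)

theorem pvScat_append (a b : List String) : pvScat (a ++ b) = pvScat a ++ pvScat b := by
  induction a with
  | nil => simp [pvScat]
  | cons h t ih => simp [pvScat, ih, String.append_assoc]

-- within one batch (no flush): A's loop just accumulates the two fragments and counts
theorem pvInner (bs : Int) (l : List String) : ∀ (k : Int)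
    (dls ses : List String) (cd cs : String),
    0 ≤ k → k + l.length < bs →
    l.foldl (pvLoopA bs) (dls, ses, cd, cs, k) =
      (dls, ses, cd ++ pvScat (l.map pvDlFragA),
       cs ++ pvScat ((PySem.List.enumerate l k).map (fun p => pvSeFragA p.1 p.2)),
       k + l.length) := by
  induction l with
  | nil =>
    intro k dls ses cd cs _ _
    simp [pvScat, PySem.List.enumerate_nil]
  | cons x t ih =>
    intro k dls ses cd cs hk h
    have hnot : ¬ (k + 1 ≥ bs) := by simp at h ⊢; push_cast at h; omega
    simp only [List.foldl_cons, pvLoopA]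
    rw [if_neg hnot]
    rw [ih (k + 1) dls ses (cd ++ pvDlFragA x) (cs ++ pvSeFragA k x) (by omega)
        (by simp at h ⊢; push_cast at h ⊢; omega)]
    simp [pvScat, PySem.List.enumerate_cons, String.append_assoc]
    push_cast
    ring

-- a full batch: A's loop emits exactly the two rendered strings of that chunk and resets
theorem pvChunkStep (bs : Int) (hb : 1 ≤ bs) (c rest dls ses : List String)
    (hc : (c.length : Int) = bs) :
    (c ++ rest).foldl (pvLoopA bs) (dls, ses, pvInit, "", 0) =
      rest.foldl (pvLoopA bs) (dls ++ [pvMkDlA c], ses ++ [pvMkSeA c], pvInit, "", 0) := by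
  have hne : c ≠ [] := by
    intro hnil; rw [hnil] at hc; simp at hc; omega
  rcases (List.eq_nil_or_concat c).resolve_left hne with ⟨c', x, rfl⟩
  have hlen' : ((c'.length : Int)) + 1 = bs := by
    simpa [List.length_concat] using hc
  rw [List.concat_eq_append, List.append_assoc, List.foldl_append]
  rw [pvInner bs c' 0 dls ses pvInit "" le_rfl (by push_cast; omega)]
  simp only [List.singleton_append, List.foldl_cons, pvLoopA]
  have hge : (0 : Int) + c'.length + 1 ≥ bs := by push_cast; omega
  rw [if_pos hge]
  have hdl : pvInit ++ pvScat (List.map pvDlFragA c') ++ pvDlFragA x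
      = pvInit ++ PySem.Str.join "" (List.map pvDlFragA (c' ++ [x])) := by
    rw [pvJoin_empty]
    simp [List.map_append, pvScat_append, pvScat, String.append_assoc]
  have hse : "" ++ pvScat (List.map (fun p => pvSeFragA p.1 p.2) (PySem.List.enumerate c'))
        ++ pvSeFragA (0 + (c'.length : Int)) x
      = PySem.Str.join "" (List.map (fun p => pvSeFragA p.1 p.2) (PySem.List.enumerate (c' ++ [x]))) := by
    rw [pvJoin_empty]
    rw [show PySem.List.enumerate (c' ++ [x]) = PySem.List.enumerate (c' ++ [x]) 0 from rfl,
       PySem.List.enumerate_append]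
    simp [List.map_append, pvScat_append, PySem.List.enumerate_cons, PySem.List.enumerate_nil,
      pvScat]
  rw [hdl, hse, pvMkDlA, pvMkSeA]

-- A's whole run equals "append the rendered chunks of pvChunksA"
theorem pvAMain (bs : Int) (hb : 1 ≤ bs) : ∀ (n : Nat) (l : List String), l.length = n →
    ∀ (dls ses : List String),
    pvFinishA (l.foldl (pvLoopA bs) (dls, ses, pvInit, "", 0)) =
      (dls ++ (pvChunksA bs.toNat l).map pvMkDlA,
       ses ++ (pvChunksA bs.toNat l).map pvMkSeA) := by
  intro n
  induction n using Nat.strong_induction_on with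
  | _ n ih =>
    intro l hl dls ses
    have hSpos : 0 < bs.toNat := by omega
    by_cases hge : bs.toNat ≤ l.length
    · have htake : ((l.take bs.toNat).length : Int) = bs := by
        rw [List.length_take]; push_cast; omega
      have hsplit : l = l.take bs.toNat ++ l.drop bs.toNat := (List.take_append_drop bs.toNat l).symm
      rw [pvChunksA, dif_pos ⟨hSpos, hge⟩]
      conv_lhs => rw [hsplit]
      rw [pvChunkStep bs hb (l.take bs.toNat) (l.drop bs.toNat) dls ses htake]
      rw [ih (l.drop bs.toNat).length (by rw [List.length_drop]; omega) (l.drop bs.toNat) rfl]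
      simp [List.append_assoc]
    · rw [pvChunksA, dif_neg (by omega)]
      rw [pvInner bs l 0 dls ses pvInit "" le_rfl (by push_cast; omega)]
      simp only [pvFinishA]
      have hpos : PySem.Str.len (pvInit ++ pvScat (l.map pvDlFragA)) > 0 := by
        simp [PySem.Str.len, pvInit]
        omega
      rw [if_pos hpos]
      simp [pvMkDlA, pvMkSeA, pvJoin_empty]

-- range(a, b, s) with 0 < s and a < b starts with a
theorem pvRangeCons (a b s : Int) (hs : 0 < s) (hab : a < b) :
    PySem.List.pyRange a b s = a :: PySem.List.pyRange (a + s) b s := by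
  rw [PySem.List.pyRange_of_pos _ _ hs, PySem.List.pyRange_of_pos _ _ hs, if_pos hab]
  have hkey : (b - a + s - 1) / s = (b - a - 1) / s + 1 := by
    have h1 : b - a + s - 1 = (b - a - 1) + 1 * s := by ring
    rw [h1, Int.add_mul_ediv_right _ _ (by omega : s ≠ 0)]
  have h0 : 0 ≤ (b - a - 1) / s := Int.ediv_nonneg (by omega) (by omega)
  have hM : (if a + s < b then ((b - (a + s) + s - 1) / s).toNat else 0)
      = ((b - a - 1) / s).toNat := by
    split_ifs with h
    · have he : b - (a + s) + s - 1 = b - a - 1 := by ring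
      rw [he]
    · have hz : (b - a - 1) / s = 0 := Int.ediv_eq_zero_of_lt (by omega) (by omega)
      simp [hz]
  rw [hM]
  have hN : ((b - a + s - 1) / s).toNat = ((b - a - 1) / s).toNat + 1 := by omega
  rw [hN, List.range_succ_eq_map, List.map_cons, List.map_map]
  congr 1
  · simp
  · apply List.map_congr_left
    intro k _
    simp [Function.comp]
    push_cast
    ring

theorem pvRangeNil (a b s : Int) (hs : 0 < s) (h : b ≤ a) :
    PySem.List.pyRange a b s = [] := by
  rw [PySem.List.pyRange_of_pos _ _ hs, if_neg (by omega)]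
  simp

-- B's whole run equals "the rendered chunks of pvChunksB"
theorem pvBAux (bs : Int) (hb : 1 ≤ bs) (l : List String) :
    ∀ (n : Nat) (rest : List String), rest.length = n →
    ∀ (a : Int) (acc1 acc2 : List String), 0 ≤ a → l.drop a.toNat = rest →
    a + rest.length = l.length →
    (PySem.List.pyRange a l.length bs).foldl (pvStepB bs l) (acc1, acc2)
      = (acc1 ++ (pvChunksB bs.toNat rest).map pvDlB,
         acc2 ++ (pvChunksB bs.toNat rest).map pvSeB) := by
  intro n
  induction n using Nat.strong_induction_on with
  | _ n ih =>
    intro rest hlen a acc1 acc2 ha hdrop hsum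
    cases rest with
    | nil =>
      rw [pvRangeNil a l.length bs (by omega) (by simp at hsum; omega)]
      rw [pvChunksB, dif_neg (by simp)]
      simp
    | cons x t =>
      have hlt : a < (l.length : Int) := by simp at hsum; omega
      rw [pvRangeCons a _ bs (by omega) hlt, List.foldl_cons]
      have hchunk : PySem.List.slice l (some a) (some (a + bs)) = (x :: t).take bs.toNat := by
        rw [PySem.List.slice_toNat l ha (by omega), hdrop]
        congr 1
        omega
      simp only [pvStepB, hchunk]
      rw [pvChunksB, dif_pos ⟨by omega, by simp⟩]
      by_cases hfull : bs ≤ ((x :: t).length : Int)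
      · have hlen' : ((x :: t).drop bs.toNat).length < n := by
          simp at hlen ⊢
          omega
        rw [ih _ hlen' ((x :: t).drop bs.toNat) rfl (a + bs)
            (acc1 ++ [pvDlB ((x :: t).take bs.toNat)])
            (acc2 ++ [pvSeB ((x :: t).take bs.toNat)]) (by omega)
            (by rw [← hdrop, List.drop_drop]; congr 1; omega)
            (by rw [List.length_drop]; simp at hsum hfull ⊢; omega)]
        simp [List.append_assoc]
      · have hnil : ((x :: t).drop bs.toNat) = [] := List.drop_eq_nil_of_le (by simp at hfull ⊢; omega)
        rw [pvRangeNil (a + bs) l.length bs (by omega) (by simp at hsum hfull ⊢; omega)]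
        rw [List.foldl_nil, hnil, pvChunksB, dif_neg (by simp)]
        rw [List.take_of_length_le (by simp at hfull ⊢; omega)]
        simp

theorem pvBMain (bs : Int) (hb : 1 ≤ bs) (l : List String) :
    produce_needed_to_add_cookie_contents_alt bs l
      = ((pvChunksB bs.toNat l).map pvDlB, (pvChunksB bs.toNat l).map pvSeB) := by
  unfold produce_needed_to_add_cookie_contents_alt
  rw [PySem.List.len_eq]
  simpa using pvBAux bs hb l l.length l rfl 0 [] [] le_rfl (by simp) (by simp)

-- '' -joined (x ++ sep) fragments = sep-joined x fragments followed by one sep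
theorem pvJoinSep (sep : List Char) (ps : List (List Char)) (h : ps ≠ []) :
    PySem.Chars.join [] (ps.map (· ++ sep)) = PySem.Chars.join sep ps ++ sep := by
  induction ps with
  | nil => simp at h
  | cons p t ih =>
    cases t with
    | nil => simp [PySem.Chars.join_singleton]
    | cons q r =>
      show PySem.Chars.join [] ((p ++ sep) :: (q ++ sep) :: (r.map (· ++ sep))) = _
      rw [PySem.Chars.join_cons_cons, PySem.Chars.join_cons_cons]
      have ih' := ih (by simp)
      rw [List.map_cons] at ih'
      rw [ih']
      simp [List.append_assoc]

-- A's fragments are B's fragments with the trailing separator attached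
theorem pvFragDl_toList (f : String) :
    (pvDlFragA f).toList = (pvSrcB f).toList ++ (" or " : String).toList := by
  simp [pvDlFragA, pvSrcB]

theorem pvFragSe_toList (idx : Int) (f : String) :
    (pvSeFragA idx f).toList = (pvSeFragB idx f).toList ++ (("&" : String)).toList := by
  simp [pvSeFragA, pvSeFragB]

-- the two renderings agree on every non-empty chunk
theorem pvRenderDl (c : List String) (hc : c ≠ []) : pvMkDlA c = pvDlB c := by
  apply String.toList_inj.mp
  have hmap : (c.map pvDlFragA).map String.toList
      = ((c.map pvSrcB).map String.toList).map (· ++ (" or " : String).toList) := by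
    simp only [List.map_map]
    exact List.map_congr_left fun f _ => pvFragDl_toList f
  have hne : (c.map pvSrcB).map String.toList ≠ [] := by simpa using hc
  simp only [pvMkDlA, pvDlB, String.toList_append, PySem.Str.toList_slice,
    PySem.Str.toList_join]
  rw [show ("" : String).toList = ([] : List Char) from rfl, hmap,
    pvJoinSep _ _ hne]
  rw [PySem.Chars.slice_eq_listSlice]
  rw [show pvInit.toList ++ (PySem.Chars.join (" or " : String).toList ((c.map pvSrcB).map String.toList) ++ (" or " : String).toList)
      = (pvInit.toList ++ PySem.Chars.join (" or " : String).toList ((c.map pvSrcB).map String.toList)) ++ (" or " : String).toList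
    from by simp [List.append_assoc]]
  rw [PySem.List.slice_to_neg_ofNat _ 4 (by omega)]
  rw [show (((pvInit.toList ++ PySem.Chars.join (" or " : String).toList ((c.map pvSrcB).map String.toList)) ++ (" or " : String).toList)).length - 4
      = (pvInit.toList ++ PySem.Chars.join (" or " : String).toList ((c.map pvSrcB).map String.toList)).length
    from by simp; omega]
  rw [List.take_left]
  simp [pvInit]

theorem pvRenderSe (c : List String) (hc : c ≠ []) : pvMkSeA c = pvSeB c := by
  apply String.toList_inj.mp
  have hmap : ((PySem.List.enumerate c).map (fun p => pvSeFragA p.1 p.2)).map String.toList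
      = (((PySem.List.enumerate c).map (fun p => pvSeFragB p.1 p.2)).map String.toList).map
          (· ++ (("&" : String)).toList) := by
    simp only [List.map_map]
    exact List.map_congr_left fun p _ => pvFragSe_toList p.1 p.2
  have hne : ((PySem.List.enumerate c).map (fun p => pvSeFragB p.1 p.2)).map String.toList ≠ [] := by
    cases c with
    | nil => exact absurd rfl hc
    | cons y ys => simp [PySem.List.enumerate_cons]
  simp only [pvMkSeA, pvSeB, String.toList_append, PySem.Str.toList_slice,
    PySem.Str.toList_join]
  rw [show ("" : String).toList = ([] : List Char) from rfl, hmap,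
    pvJoinSep _ _ hne]
  rw [PySem.Chars.slice_eq_listSlice, PySem.List.slice_to_neg_one]
  rw [show (("&" : String)).toList = ['&'] from rfl]
  rw [List.dropLast_concat]

-- outside D_: the two chunkings agree and every chunk is non-empty
theorem pvChunksEq (S : Nat) (hS : 0 < S) :
    ∀ (n : Nat) (l : List String), l.length = n → ¬ (S ∣ l.length) →
    pvChunksA S l = pvChunksB S l ∧ ∀ c ∈ pvChunksB S l, c ≠ [] := by
  intro n
  induction n using Nat.strong_induction_on with
  | _ n ih =>
    intro l hl hd
    have hne : l ≠ [] := by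
      intro h; rw [h] at hd; simp at hd
    by_cases hge : S ≤ l.length
    · have hd' : ¬ (S ∣ (l.drop S).length) := by
        rw [List.length_drop]
        intro ⟨k, hk⟩
        apply hd
        refine ⟨k + 1, ?_⟩
        have hmul : S * (k + 1) = S * k + S := Nat.mul_succ S k
        omega
      obtain ⟨h1, h2⟩ := ih (l.drop S).length (by simp; omega) (l.drop S) rfl hd'
      rw [pvChunksA, dif_pos ⟨hS, hge⟩, pvChunksB, dif_pos ⟨hS, hne⟩, h1]
      refine ⟨rfl, ?_⟩
      intro c hc
      rcases List.mem_cons.mp hc with h | h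
      · subst h
        intro hcon
        rcases List.take_eq_nil_iff.mp hcon with h | h
        · omega
        · exact absurd h hne
      · exact h2 c h
    · rw [pvChunksA, dif_neg (by omega), pvChunksB, dif_pos ⟨hS, hne⟩,
        List.take_of_length_le (by omega), List.drop_eq_nil_of_le (by omega),
        pvChunksB, dif_neg (by simp)]
      exact ⟨rfl, by intro c hc; simp at hc; subst hc; exact hne⟩

-- inside D_: A has exactly one batch more than B (the leftover flush)
theorem pvChunksLen (S : Nat) (hS : 0 < S) :
    ∀ (n : Nat) (l : List String), l.length = n → S ∣ l.length →
    (pvChunksA S l).length = (pvChunksB S l).length + 1 := by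
  intro n
  induction n using Nat.strong_induction_on with
  | _ n ih =>
    intro l hl hd
    by_cases hne : l = []
    · subst hne
      rw [pvChunksA, dif_neg (by simp; omega), pvChunksB, dif_neg (by simp)]
      simp
    · rcases hd with ⟨k, hk⟩
      have hk0 : 0 < k := by
        rcases Nat.eq_zero_or_pos k with h | h
        · subst h
          simp at hk
          exact absurd hk hne
        · exact h
      have hge : S ≤ l.length := by
        rw [hk]
        calc S = S * 1 := (Nat.mul_one S).symm
          _ ≤ S * k := Nat.mul_le_mul_left S hk0
      have hd' : S ∣ (l.drop S).length := by
        rw [List.length_drop]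
        refine ⟨k - 1, ?_⟩
        have hm : S * (k - 1) + S = S * k := by
          calc S * (k - 1) + S = S * (k - 1 + 1) := (Nat.mul_succ S (k - 1)).symm
            _ = S * k := by rw [Nat.sub_add_cancel hk0]
        omega
      have := ih (l.drop S).length (by simp; omega) (l.drop S) rfl hd'
      rw [pvChunksA, dif_pos ⟨hS, hge⟩, pvChunksB, dif_pos ⟨hS, hne⟩]
      simpa using this

-- ===== VERDICT (by name: the statements are the Claim_ definitions above) =====
theorem produce_needed_to_add_cookie_contents_spec : Claim_unchanged_produce_needed_to_add_cookie_contents := by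
  intro bs l _ hpre hnd
  unfold Pre_produce_needed_to_add_cookie_contents at hpre
  unfold D_produce_needed_to_add_cookie_contents at hnd
  show produce_needed_to_add_cookie_contents bs l = produce_needed_to_add_cookie_contents_alt bs l
  unfold produce_needed_to_add_cookie_contents
  rw [pvAMain bs hpre l.length l rfl [] [], pvBMain bs hpre l]
  have hdvd : ¬ (bs.toNat ∣ l.length) := by
    intro ⟨k, hk⟩
    apply hnd
    have hcast : (l.length : Int) = bs * k := by
      rw [hk]
      push_cast
      rw [Int.toNat_of_nonneg (by omega)]
    rw [hcast]
    simp [Int.mul_emod_right]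
  obtain ⟨he, hnonempty⟩ := pvChunksEq bs.toNat (by omega) l.length l rfl hdvd
  rw [he]
  simp only [List.nil_append, Prod.mk.injEq]
  exact ⟨List.map_congr_left fun c hc => pvRenderDl c (hnonempty c hc),
         List.map_congr_left fun c hc => pvRenderSe c (hnonempty c hc)⟩

theorem produce_needed_to_add_cookie_contents_changed : Claim_changed_produce_needed_to_add_cookie_contents := by
  unfold Claim_changed_produce_needed_to_add_cookie_contents; decide

theorem produce_needed_to_add_cookie_contents_tight : Claim_exact_produce_needed_to_add_cookie_contents := by
  intro bs l _ hpre hd heq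
  unfold Pre_produce_needed_to_add_cookie_contents at hpre
  unfold D_produce_needed_to_add_cookie_contents at hd
  have hdvd : bs.toNat ∣ l.length := by
    have h1 : bs ∣ (l.length : Int) := Int.dvd_of_emod_eq_zero hd
    have h2 : ((bs.toNat : Int)) ∣ ((l.length : Nat) : Int) := by
      rwa [Int.toNat_of_nonneg (by omega)]
    exact_mod_cast h2
  have hlen := pvChunksLen bs.toNat (by omega) l.length l rfl hdvd
  unfold produce_needed_to_add_cookie_contents at heq
  rw [pvAMain bs hpre l.length l rfl [] [], pvBMain bs hpre l] at heq
  have hcontra := congrArg (fun p => p.1.length) heq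
  simp at hcontra
  omega
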